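-- pv_equiv track=rewrite | github.com/crothmeier/openaiLLM | nvme_models/validators.py | validate_command_injection
-- ===== SOURCE A (Python) =====
-- def validate_command_injection(input_str: str) -> bool:
--     """Validate that input doesn't contain shell metacharacters.
--
--     Args:
--         input_str: Input string to validate
--
--     Returns:
--         bool: False if input contains dangerous shell metacharacters, True otherwise
--     """
--     # Define dangerous shell metacharacters
--     dangerous_chars = [
--         ';',   # Command separator
--         '|',   # Pipe
--         '&',   # Background/command separator
--         '$',   # Variable expansion
--         '`',   # Command substitution
--         '(',   # Subshell
--         ')',   # Subshell
--         '{',   # Command grouping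
--         '}',   # Command grouping
--         '<',   # Input redirection
--         '>',   # Output redirection
--         '\n',  # Newline
--         '\r',  # Carriage return
--     ]
--
--     # Check for presence of any dangerous character
--     for char in dangerous_chars:
--         if char in input_str:
--             return False
--
--     return True
-- ===== SOURCE B (Python) =====
-- _DELETE_DANGEROUS = str.maketrans('', '', ';|&$`(){}<>\n\r')
--
-- def validate_command_injection(input_str: str) -> bool:
--     """Safe iff deleting every dangerous shell metacharacter leaves the string unchanged in length."""
--     return len(input_str.translate(_DELETE_DANGEROUS)) == len(input_str)
-- ===== Notes on version B (the rewrite author's own statement) =====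
-- stated objective: idiomatic
-- what changed: Instead of looping over the 13 metacharacters and scanning the input for each, B sanitizes the input in one translate pass that deletes all dangerous characters and decides validity by comparing the sanitized length with the original length.
import Mathlib
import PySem

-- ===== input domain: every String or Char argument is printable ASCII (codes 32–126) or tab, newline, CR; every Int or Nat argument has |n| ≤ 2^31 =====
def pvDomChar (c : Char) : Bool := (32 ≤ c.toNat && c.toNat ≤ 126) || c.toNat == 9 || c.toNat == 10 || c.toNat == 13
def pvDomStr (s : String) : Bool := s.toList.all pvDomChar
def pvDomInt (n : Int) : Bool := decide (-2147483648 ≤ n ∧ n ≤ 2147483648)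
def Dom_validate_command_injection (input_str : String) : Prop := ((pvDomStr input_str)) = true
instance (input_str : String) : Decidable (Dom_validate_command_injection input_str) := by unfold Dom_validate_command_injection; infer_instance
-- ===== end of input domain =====

-- B replaces A's loop over the 13 metacharacters (each a scan of the input) by one
-- translate pass deleting the dangerous characters, comparing sanitized vs original length (idiomatic).

-- ===== PORT A =====
-- dangerous_chars, in A's order
def vciDangerousChars : List Char :=
  [';', '|', '&', '$', '`', '(', ')', '{', '}', '<', '>', '\n', '\r']

-- 'for char in dangerous_chars: if char in input_str: return False' / 'return True'
def vciLoop (cs : List Char) : List Char → Bool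
  | [] => true
  | c :: rest => if cs.contains c then false else vciLoop cs rest

def validate_command_injection (input_str : String) : Bool :=
  vciLoop input_str.toList vciDangerousChars

-- ===== PORT B =====
-- _DELETE_DANGEROUS = str.maketrans('', '', ';|&$`(){}<>\n\r'): a deletion table;
-- translate drops exactly the characters of that string.
def vciDeleteTable : List Char := ";|&$`(){}<>\n\r".toList

-- 'len(input_str.translate(_DELETE_DANGEROUS)) == len(input_str)'
def validate_command_injection_alt (input_str : String) : Bool :=
  (input_str.toList.filter (fun c => !vciDeleteTable.contains c)).length
    == input_str.toList.length

-- ===== PRECONDITION & SPEC =====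
def Spec_validate_command_injection (input_str : String) (out : Bool) : Prop := out = validate_command_injection_alt input_str
instance (input_str : String) (out : Bool) : Decidable (Spec_validate_command_injection input_str out) := by unfold Spec_validate_command_injection; infer_instance

-- ===== CLAIM (what is proved, stated in full; the proofs are below) =====
def Claim_equal_validate_command_injection : Prop := ∀ (input_str : String), Dom_validate_command_injection input_str → Spec_validate_command_injection input_str (validate_command_injection input_str)

-- ===== LEMMAS AND PROOFS =====
theorem vciLoop_eq_true_iff (cs : List Char) (ds : List Char) :
    vciLoop cs ds = true ↔ ∀ c ∈ ds, c ∉ cs := by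
  induction ds with
  | nil => simp [vciLoop]
  | cons c rest ih =>
    by_cases hm : c ∈ cs
    · simp [vciLoop, hm]
    · simp [vciLoop, hm, ih]

theorem vciTable_eq_chars : vciDeleteTable = vciDangerousChars := by decide

-- ===== VERDICT (by name: the statement is the Claim_ definition above) =====
theorem validate_command_injection_spec : Claim_equal_validate_command_injection := by
  intro s _
  unfold Spec_validate_command_injection validate_command_injection validate_command_injection_alt
  rw [Bool.eq_iff_iff, vciLoop_eq_true_iff, beq_iff_eq,
    List.length_filter_eq_length_iff]
  constructor
  · intro h c hc
    simp only [Bool.not_eq_eq_eq_not, Bool.not_true, ← Bool.not_eq_true,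
      List.contains_eq_mem, decide_eq_true_eq, vciTable_eq_chars] at *
    exact fun hd => h c hd hc
  · intro h c hcd hcs
    have := h c hcs
    simp only [Bool.not_eq_eq_eq_not, Bool.not_true, List.contains_eq_mem,
      decide_eq_false_iff_not, vciTable_eq_chars] at this
    exact this hcd
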